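-- pv_equiv track=rewrite | github.com/Ouail-Ahmed/Fox | sri/indexation.py | get_docs_max_freq
-- ===== SOURCE A (Python) =====
-- def get_docs_max_freq(tokens):
--     max_freq_docs = {}
--
--     for token, posting in tokens.items():
--         for doc_id, freq in posting.items():
--             if doc_id in max_freq_docs.keys():
--                 if freq > max_freq_docs[doc_id]:
--                     max_freq_docs[doc_id] = freq
--             else:
--                 max_freq_docs[doc_id] = freq
--
--     return max_freq_docs
-- ===== SOURCE B (Python) =====
-- def get_docs_max_freq(tokens):
--     grouped = {}
--     for posting in tokens.values():
--         for doc_id, freq in posting.items():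
--             grouped.setdefault(doc_id, []).append(freq)
--     return {doc_id: max(freqs) for doc_id, freqs in grouped.items()}
-- ===== Notes on version B (the rewrite author's own statement) =====
-- stated objective: alternative
-- what changed: B groups every observed frequency per doc_id into lists in one pass and reduces each group with max() at the end, instead of A's online running-maximum updated in place with membership tests.
import Mathlib
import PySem

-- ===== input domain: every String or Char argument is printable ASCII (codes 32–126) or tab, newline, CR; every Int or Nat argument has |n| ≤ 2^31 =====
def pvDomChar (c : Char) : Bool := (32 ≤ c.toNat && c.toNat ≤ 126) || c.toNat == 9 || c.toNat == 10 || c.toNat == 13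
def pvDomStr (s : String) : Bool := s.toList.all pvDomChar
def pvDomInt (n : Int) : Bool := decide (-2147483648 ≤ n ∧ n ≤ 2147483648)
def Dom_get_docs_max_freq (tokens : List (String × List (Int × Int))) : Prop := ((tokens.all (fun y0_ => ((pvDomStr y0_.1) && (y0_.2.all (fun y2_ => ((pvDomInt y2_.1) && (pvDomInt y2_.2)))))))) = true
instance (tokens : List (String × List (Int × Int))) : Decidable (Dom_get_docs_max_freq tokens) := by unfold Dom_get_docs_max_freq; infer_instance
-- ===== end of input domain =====

-- B collects every frequency per doc_id into a list in one pass and reduces each list with max()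
-- at the end, instead of A's in-place running maximum; same O(N) cost, different decomposition.

-- ===== PORT A =====
-- inner-loop body of A: running maximum updated in place (membership test, then compare)
def stepA (m : PySem.Dict Int Int) (p : Int × Int) : PySem.Dict Int Int :=
  if m.contains p.1 then
    if p.2 > m.getD p.1 0 then m.insert p.1 p.2 else m
  else m.insert p.1 p.2

def get_docs_max_freq (tokens : List (String × List (Int × Int))) : List (Int × Int) :=
  (tokens.foldl (fun m tp => tp.2.foldl stepA m)
    (PySem.Dict.empty : PySem.Dict Int Int)).items

-- ===== PORT B =====
-- Python's max(l); only ever applied to nonempty lists in B (.getD 0 is an unreachable default)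
def pymax (l : List Int) : Int := (PySem.List.max? l (fun x => x)).getD 0

-- inner-loop body of B: grouped.setdefault(doc_id, []).append(freq)
def stepB (g : PySem.Dict Int (List Int)) (p : Int × Int) : PySem.Dict Int (List Int) :=
  g.modify p.1 [] (· ++ [p.2])

def get_docs_max_freq_alt (tokens : List (String × List (Int × Int))) : List (Int × Int) :=
  ((tokens.foldl (fun g tp => tp.2.foldl stepB g)
      (PySem.Dict.empty : PySem.Dict Int (List Int))).items).map (fun p => (p.1, pymax p.2))

-- ===== PRECONDITION & SPEC =====
def Spec_get_docs_max_freq (tokens : List (String × List (Int × Int))) (out : List (Int × Int)) : Prop := out = get_docs_max_freq_alt tokens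
instance (tokens : List (String × List (Int × Int))) (out : List (Int × Int)) : Decidable (Spec_get_docs_max_freq tokens out) := by unfold Spec_get_docs_max_freq; infer_instance

-- ===== CLAIM (what is proved, stated in full; the proofs are below) =====
def Claim_equal_get_docs_max_freq : Prop := ∀ (tokens : List (String × List (Int × Int))), Dom_get_docs_max_freq tokens → Spec_get_docs_max_freq tokens (get_docs_max_freq tokens)

-- ===== LEMMAS AND PROOFS =====

-- invariant tying A's running-max dict to B's grouped-lists dict
def InvAB (m : PySem.Dict Int Int) (g : PySem.Dict Int (List Int)) : Prop :=
  m.keys = g.keys ∧ g.keys.Nodup ∧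
  (∀ k : Int, m.getD k 0 = pymax (g.getD k [])) ∧
  (∀ k : Int, k ∈ g.keys → g.getD k [] ≠ [])

theorem max?_cons_isSome (l : List Int) : ∀ (a : Int),
    (PySem.List.max? (a :: l) (fun x => x)).isSome := by
  induction l with
  | nil => intro a; rfl
  | cons b t ih =>
    intro a
    have h : PySem.List.max? (a :: b :: t) (fun x : Int => x)
        = PySem.List.max? ((if a < b then b else a) :: t) (fun x : Int => x) := by
      by_cases hab : a < b <;> simp [PySem.List.max?, List.foldl_cons, hab]
    rw [h]; exact ih _

theorem pymax_append (l : List Int) (x : Int) (h : l ≠ []) :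
    pymax (l ++ [x]) = if pymax l < x then x else pymax l := by
  obtain ⟨a, t, rfl⟩ : ∃ a t, l = a :: t := by
    cases l with
    | nil => exact absurd rfl h
    | cons a t => exact ⟨a, t, rfl⟩
  obtain ⟨m, hm⟩ := Option.isSome_iff_exists.mp (max?_cons_isSome t a)
  simp only [pymax, PySem.List.max?] at hm ⊢
  rw [List.foldl_append, hm]
  by_cases hlt : m < x <;> simp [hlt]

theorem step_inv (m : PySem.Dict Int Int) (g : PySem.Dict Int (List Int)) (p : Int × Int)
    (h : InvAB m g) : InvAB (stepA m p) (stepB g p) := by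
  obtain ⟨hk, hnd, hval, hne⟩ := h
  have hmc : m.contains p.1 = decide (p.1 ∈ g.keys) := by
    rw [PySem.Dict.contains_eq_decide_mem_keys, hk]
  have hgc : g.contains p.1 = decide (p.1 ∈ g.keys) :=
    PySem.Dict.contains_eq_decide_mem_keys g p.1
  by_cases hmem : p.1 ∈ g.keys
  · -- existing key: A compares with the running max, B appends to the group
    have hl : g.getD p.1 [] ≠ [] := hne p.1 hmem
    have hkeysB : (stepB g p).keys = g.keys := by
      rw [stepB, PySem.Dict.keys_modify, PySem.Dict.keys_insert_of_contains _ _ (by rw [hgc]; simp [hmem])]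
    have hgetB : ∀ k : Int, (stepB g p).getD k [] =
        if k = p.1 then g.getD p.1 [] ++ [p.2] else g.getD k [] := by
      intro k; rw [stepB, PySem.Dict.getD_modify]
    have hA : stepA m p = if p.2 > pymax (g.getD p.1 []) then m.insert p.1 p.2 else m := by
      rw [stepA, hmc]; simp [hmem, hval p.1]
    refine ⟨?_, by rw [hkeysB]; exact hnd, ?_, ?_⟩
    · rw [hkeysB, hA]
      by_cases hgt : p.2 > pymax (g.getD p.1 [])
      · simp only [hgt, if_pos]
        rw [PySem.Dict.keys_insert_of_contains _ _ (by rw [hmc]; simp [hmem]), hk]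
      · simp [hgt, hk]
    · intro k
      rw [hgetB k, hA]
      by_cases hkp : k = p.1
      · rw [hkp, if_pos rfl, pymax_append _ _ hl]
        by_cases hgt : pymax (g.getD p.1 []) < p.2
        · rw [if_pos hgt, if_pos hgt, PySem.Dict.getD_insert, if_pos rfl]
        · rw [if_neg hgt, if_neg hgt]; exact hval p.1
      · rw [if_neg hkp]
        by_cases hgt : p.2 > pymax (g.getD p.1 [])
        · rw [if_pos hgt, PySem.Dict.getD_insert, if_neg hkp]; exact hval k
        · rw [if_neg hgt]; exact hval k
    · intro k hkmem
      rw [hgetB k]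
      by_cases hkp : k = p.1
      · simp [hkp]
      · rw [if_neg hkp]; exact hne k (by rwa [hkeysB] at hkmem)
  · -- fresh key: both sides append a new entry
    have hkeysB : (stepB g p).keys = g.keys ++ [p.1] := by
      rw [stepB, PySem.Dict.keys_modify, PySem.Dict.keys_insert_of_not_contains _ _ (by rw [hgc]; simp [hmem])]
    have hgetB : ∀ k : Int, (stepB g p).getD k [] =
        if k = p.1 then g.getD p.1 [] ++ [p.2] else g.getD k [] := by
      intro k; rw [stepB, PySem.Dict.getD_modify]
    have hgd : g.getD p.1 [] = [] := by
      exact PySem.Dict.getD_of_not_contains _ _ (by rw [hgc]; simp [hmem])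
    have hA : stepA m p = m.insert p.1 p.2 := by
      rw [stepA, hmc]; simp [hmem]
    refine ⟨?_, ?_, ?_, ?_⟩
    · rw [hkeysB, hA, PySem.Dict.keys_insert_of_not_contains _ _ (by rw [hmc]; simp [hmem]), hk]
    · rw [hkeysB]
      refine List.nodup_append.mpr ⟨hnd, List.nodup_singleton _, ?_⟩
      intro a ha b hb heq
      rw [List.mem_singleton] at hb
      exact hmem (hb ▸ heq ▸ ha)
    · intro k
      rw [hgetB k, hA, PySem.Dict.getD_insert]
      by_cases hkp : k = p.1
      · rw [if_pos hkp, if_pos hkp, hgd]; rfl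
      · rw [if_neg hkp, if_neg hkp]; exact hval k
    · intro k hkmem
      rw [hgetB k]
      by_cases hkp : k = p.1
      · simp [hkp]
      · rw [if_neg hkp]
        rw [hkeysB] at hkmem
        rcases List.mem_append.mp hkmem with h' | h'
        · exact hne k h'
        · exact absurd (by simpa using h') hkp

theorem foldl_step_inv (ps : List (Int × Int)) (m : PySem.Dict Int Int)
    (g : PySem.Dict Int (List Int)) (h : InvAB m g) :
    InvAB (ps.foldl stepA m) (ps.foldl stepB g) := by
  induction ps generalizing m g with
  | nil => exact h
  | cons p t ih => exact ih _ _ (step_inv m g p h)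

theorem tokens_fold_inv (tokens : List (String × List (Int × Int)))
    (m : PySem.Dict Int Int) (g : PySem.Dict Int (List Int)) (h : InvAB m g) :
    InvAB (tokens.foldl (fun m tp => tp.2.foldl stepA m) m)
        (tokens.foldl (fun g tp => tp.2.foldl stepB g) g) := by
  induction tokens generalizing m g with
  | nil => exact h
  | cons tp t ih => exact ih _ _ (foldl_step_inv tp.2 m g h)

theorem invAB_empty : InvAB PySem.Dict.empty PySem.Dict.empty := by
  refine ⟨by simp, by simp, fun k => by simp [PySem.Dict.getD_empty, pymax, PySem.List.max?],
    fun k hk => by simp [PySem.Dict.keys_empty] at hk⟩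

-- ===== VERDICT (by name: the statement is the Claim_ definition above) =====
theorem get_docs_max_freq_spec : Claim_equal_get_docs_max_freq := by
  intro tokens _
  unfold Spec_get_docs_max_freq get_docs_max_freq get_docs_max_freq_alt
  obtain ⟨hk, hnd, hval, _⟩ := tokens_fold_inv tokens _ _ invAB_empty
  rw [PySem.Dict.items_eq_map_keys _ (hk ▸ hnd) 0,
      PySem.Dict.items_eq_map_keys _ hnd ([] : List Int), List.map_map, hk]
  exact List.map_congr_left (fun k _ => by simp [Function.comp, hval k])
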